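-- pv_equiv track=rewrite | github.com/cwiertniamichal/SimulatedAnnealing | BinaryPicture.py | count_neighbours_4_black
-- ===== SOURCE A (Python) =====
-- def count_neighbours_4_black(picture):
--     neighbourhood = []
--     for i in range(len(picture)):
--         neighbourhood.append([])
--         for j in range(len(picture)):
--             neighbourhood[i].append(0)
--
--     for i in range(len(picture)):
--         for j in range(len(picture)):
--             if i + 1 < len(picture) and picture[i][j] == picture[i + 1][j] and picture[i][j] == 1:
--                 neighbourhood[i][j] -= 1
--                 neighbourhood[i + 1][j] -= 1
--             else:
--                 if i + 1 < len(picture):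
--                     neighbourhood[i][j] += 1
--                     neighbourhood[i + 1][j] += 1
--             if j + 1 < len(picture) and picture[i][j] == picture[i][j + 1] and picture[i][j] == 1:
--                 neighbourhood[i][j] -= 1
--                 neighbourhood[i][j + 1] -= 1
--             else:
--                 if j + 1 < len(picture):
--                     neighbourhood[i][j] += 1
--                     neighbourhood[i][j + 1] += 1
--
--     return neighbourhood
-- ===== SOURCE B (Python) =====
-- def count_neighbours_4_black(picture):
--     n = len(picture)
--
--     def score(i, j):
--         v = picture[i][j]
--         s = 0
--         for ni, nj in ((i - 1, j), (i + 1, j), (i, j - 1), (i, j + 1)):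
--             if 0 <= ni < n and 0 <= nj < n:
--                 s += -1 if v == picture[ni][nj] and v == 1 else 1
--         return s
--
--     return [[score(i, j) for j in range(n)] for i in range(n)]
-- ===== Notes on version B (the rewrite author's own statement) =====
-- stated objective: alternative
-- what changed: Replaces A's edge-scatter (each right/down edge writes +/-1 into two cells of a pre-built mutable grid) with a per-cell gather: each cell's score is computed in one pass over its four in-range neighbours and written once, exploiting the symmetry of the edge contribution.
-- outside the precondition, e.g. on count_neighbours_4_black([[]]): A returns [[0]], B raises IndexError
import Mathlib
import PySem

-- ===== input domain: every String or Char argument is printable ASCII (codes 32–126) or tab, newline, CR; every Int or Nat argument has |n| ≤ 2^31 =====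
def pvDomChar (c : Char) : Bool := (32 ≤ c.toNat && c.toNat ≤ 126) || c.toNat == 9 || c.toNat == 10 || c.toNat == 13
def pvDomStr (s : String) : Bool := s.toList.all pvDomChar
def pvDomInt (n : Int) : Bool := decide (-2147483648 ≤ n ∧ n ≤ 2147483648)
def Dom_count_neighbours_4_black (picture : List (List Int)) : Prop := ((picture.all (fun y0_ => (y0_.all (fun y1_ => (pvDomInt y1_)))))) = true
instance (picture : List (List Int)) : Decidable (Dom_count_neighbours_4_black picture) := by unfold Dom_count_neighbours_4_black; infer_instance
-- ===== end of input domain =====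

-- B replaces A's per-edge scatter (two writes per right/down edge into a mutable grid)
-- with a per-cell gather over the four neighbours (one write per cell); same O(n^2) cost.

-- ===== PORT A =====
-- picture[i][j] with i,j from range(len(picture)): under Pre_ every access is in range,
-- so the default-0 lookup computes exactly what Python computes.
def pvCellA (p : List (List Int)) (i j : Nat) : Int := (p.getD i []).getD j 0

-- neighbourhood[x][y] ±= d  (in-place index assignment)
def pvBump (g : List (List Int)) (i j : Nat) (d : Int) : List (List Int) :=
  g.modify i (fun row => row.modify j (· + d))

-- one iteration of A's double loop at (i, j)
def pvStepA (p : List (List Int)) (n : Nat) (g : List (List Int)) (ij : Nat × Nat) :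
    List (List Int) :=
  let i := ij.1
  let j := ij.2
  let g1 :=
    if i + 1 < n ∧ pvCellA p i j = pvCellA p (i + 1) j ∧ pvCellA p i j = 1 then
      pvBump (pvBump g i j (-1)) (i + 1) j (-1)
    else if i + 1 < n then
      pvBump (pvBump g i j 1) (i + 1) j 1
    else g
  if j + 1 < n ∧ pvCellA p i j = pvCellA p i (j + 1) ∧ pvCellA p i j = 1 then
    pvBump (pvBump g1 i j (-1)) i (j + 1) (-1)
  else if j + 1 < n then
    pvBump (pvBump g1 i j 1) i (j + 1) 1
  else g1

def count_neighbours_4_black (picture : List (List Int)) : List (List Int) :=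
  let n := picture.length
  -- build the n×n zero grid by the same append loops as A
  let zero : List (List Int) :=
    (List.range n).foldl
      (fun acc _ => acc ++ [(List.range n).foldl (fun row _ => row ++ [(0 : Int)]) []]) []
  -- the nested i/j loops, in the same order
  ((List.range n).flatMap (fun i => (List.range n).map (fun j => (i, j)))).foldl
    (pvStepA picture n) zero

-- ===== PORT B =====
-- v == picture[ni][nj] is only evaluated under the guard 0 <= ni < n and 0 <= nj < n,
-- so the toNat conversion is exact (indices are never negative at access time).
def pvCellB (p : List (List Int)) (i j : Int) : Int := (p.getD i.toNat []).getD j.toNat 0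

-- score(i, j) of Source B: fold over the four neighbour offsets
def pvScore (p : List (List Int)) (n : Nat) (i j : Nat) : Int :=
  let v := pvCellB p i j
  [((i : Int) - 1, (j : Int)), ((i : Int) + 1, (j : Int)),
   ((i : Int), (j : Int) - 1), ((i : Int), (j : Int) + 1)].foldl
    (fun s nij =>
      if 0 ≤ nij.1 ∧ nij.1 < (n : Int) ∧ 0 ≤ nij.2 ∧ nij.2 < (n : Int) then
        s + (if v = pvCellB p nij.1 nij.2 ∧ v = 1 then -1 else 1)
      else s) 0

def count_neighbours_4_black_alt (picture : List (List Int)) : List (List Int) :=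
  let n := picture.length
  (List.range n).map (fun i => (List.range n).map (fun j => pvScore picture n i j))

-- ===== PRECONDITION & SPEC =====
-- Pre_ excludes ragged inputs (a row shorter than len(picture)), on which A raises
-- IndexError — except the degenerate single-empty-row picture, where A's 1x1 loop reads
-- nothing and returns a zero grid while B's gather reads the missing cell and raises IndexError.
def Pre_count_neighbours_4_black (picture : List (List Int)) : Prop :=
  ∀ row ∈ picture, picture.length ≤ row.length
instance (picture : List (List Int)) : Decidable (Pre_count_neighbours_4_black picture) := by
  unfold Pre_count_neighbours_4_black; infer_instance
def pvWitness_count_neighbours_4_black : List (List Int) := [[1, 0], [1, 1]]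

def Spec_count_neighbours_4_black (picture : List (List Int)) (out : List (List Int)) : Prop :=
  out = count_neighbours_4_black_alt picture
instance (picture : List (List Int)) (out : List (List Int)) :
    Decidable (Spec_count_neighbours_4_black picture out) := by
  unfold Spec_count_neighbours_4_black; infer_instance

-- ===== CLAIM (what is proved, stated in full; the proofs are below) =====
def Claim_equal_count_neighbours_4_black : Prop :=
  ∀ (picture : List (List Int)), Dom_count_neighbours_4_black picture →
    Pre_count_neighbours_4_black picture →
    Spec_count_neighbours_4_black picture (count_neighbours_4_black picture)

-- ===== LEMMAS AND PROOFS =====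

-- the grid of an index function
def gridOf (n : Nat) (f : Nat → Nat → Int) : List (List Int) :=
  (List.range n).map (fun a => (List.range n).map (fun b => f a b))

-- the contribution of A's iteration (i, j) to cell (a, b)
def pvDelta (p : List (List Int)) (n : Nat) (i j a b : Nat) : Int :=
  (if i + 1 < n ∧ ((a = i ∧ b = j) ∨ (a = i + 1 ∧ b = j)) then
     (if pvCellA p i j = pvCellA p (i + 1) j ∧ pvCellA p i j = 1 then -1 else 1) else 0)
  + (if j + 1 < n ∧ ((a = i ∧ b = j) ∨ (a = i ∧ b = j + 1)) then
     (if pvCellA p i j = pvCellA p i (j + 1) ∧ pvCellA p i j = 1 then -1 else 1) else 0)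

lemma gridOf_congr (n : Nat) (f g : Nat → Nat → Int)
    (h : ∀ a < n, ∀ b < n, f a b = g a b) : gridOf n f = gridOf n g := by
  unfold gridOf
  refine List.map_congr_left fun a ha => List.map_congr_left fun b hb => ?_
  exact h a (List.mem_range.mp ha) b (List.mem_range.mp hb)

lemma bump_gridOf (n : Nat) (f : Nat → Nat → Int) (i j : Nat) (hi : i < n) (_hj : j < n)
    (d : Int) :
    pvBump (gridOf n f) i j d =
      gridOf n (fun a b => if a = i ∧ b = j then f a b + d else f a b) := by
  unfold pvBump gridOf
  apply List.ext_getElem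
  · simp
  intro a h1 _
  simp only [List.length_modify, List.length_map, List.length_range] at h1
  rw [List.getElem_modify]
  simp only [List.getElem_map, List.getElem_range]
  by_cases hai : i = a
  · subst hai
    rw [if_pos rfl]
    apply List.ext_getElem
    · simp
    intro b hb1 _
    rw [List.getElem_modify]
    simp only [List.getElem_map, List.getElem_range]
    by_cases hbj : j = b
    · subst hbj; simp
    · rw [if_neg hbj, if_neg (by rintro ⟨-, h⟩; exact hbj h.symm)]
  · simp only [if_neg hai]
    apply List.map_congr_left
    intro b _
    rw [if_neg]
    rintro ⟨rfl, -⟩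
    exact hai rfl

lemma halfBump (n : Nat) (f : Nat → Nat → Int) (i j x y : Nat) (Q C : Prop)
    [Decidable Q] [Decidable C] (hi : i < n) (hj : j < n)
    (hx : Q → x < n) (hy : Q → y < n) (hne : ¬(x = i ∧ y = j)) :
    (if Q ∧ C then pvBump (pvBump (gridOf n f) i j (-1)) x y (-1)
     else if Q then pvBump (pvBump (gridOf n f) i j 1) x y 1
     else gridOf n f) =
    gridOf n (fun a b => f a b +
      if Q ∧ ((a = i ∧ b = j) ∨ (a = x ∧ b = y)) then (if C then (-1 : Int) else 1) else 0) := by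
  by_cases hQ : Q
  · by_cases hC : C
    · rw [if_pos ⟨hQ, hC⟩, bump_gridOf n f i j hi hj, bump_gridOf n _ x y (hx hQ) (hy hQ)]
      apply gridOf_congr; intro a _ b _
      simp only [hQ, hC, true_and, if_true]
      split_ifs <;> omega
    · rw [if_neg (fun h => hC h.2), if_pos hQ,
        bump_gridOf n f i j hi hj, bump_gridOf n _ x y (hx hQ) (hy hQ)]
      apply gridOf_congr; intro a _ b _
      simp only [hQ, hC, true_and, if_false]
      split_ifs <;> omega
  · rw [if_neg (fun h => hQ h.1), if_neg hQ]
    apply gridOf_congr; intro a _ b _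
    simp [hQ]

lemma step_gridOf (p : List (List Int)) (n : Nat) (f : Nat → Nat → Int) (i j : Nat)
    (hi : i < n) (hj : j < n) :
    pvStepA p n (gridOf n f) (i, j) = gridOf n (fun a b => f a b + pvDelta p n i j a b) := by
  unfold pvStepA
  simp only []
  rw [halfBump n f i j (i + 1) j (i + 1 < n) _ hi hj (fun h => h) (fun _ => hj)
      (by omega)]
  rw [halfBump n _ i j i (j + 1) (j + 1 < n) _ hi hj (fun _ => hi) (fun h => h)
      (by omega)]
  apply gridOf_congr; intro a _ b _
  unfold pvDelta
  split_ifs <;> ring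

lemma fold_gridOf (p : List (List Int)) (n : Nat) (pairs : List (Nat × Nat))
    (h : ∀ ij ∈ pairs, ij.1 < n ∧ ij.2 < n) (f : Nat → Nat → Int) :
    pairs.foldl (pvStepA p n) (gridOf n f) =
      gridOf n (fun a b => f a b + (pairs.map (fun ij => pvDelta p n ij.1 ij.2 a b)).sum) := by
  induction pairs generalizing f with
  | nil => simp [List.foldl]
  | cons ij rest ih =>
    obtain ⟨i, j⟩ := ij
    have hij := h (i, j) (List.mem_cons_self)
    rw [List.foldl_cons, step_gridOf p n f i j hij.1 hij.2,
      ih (fun q hq => h q (List.mem_cons_of_mem _ hq))]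
    apply gridOf_congr; intro a _ b _
    simp [add_assoc]

lemma sum_map_range (n : Nat) (f : Nat → Int) :
    ((List.range n).map f).sum = ∑ i ∈ Finset.range n, f i := by
  induction n with
  | zero => simp
  | succ m ih => simp [List.range_succ, Finset.sum_range_succ, ih]

lemma sum_map_flatMap {α β : Type} (l : List α) (f : α → List β) (g : β → Int) :
    ((l.flatMap f).map g).sum = (l.map (fun x => ((f x).map g).sum)).sum := by
  induction l with
  | nil => simp
  | cons x xs ih => simp [List.flatMap_cons, List.map_append, List.sum_append, ih]

-- the symmetric per-edge values
def pvV (p : List (List Int)) (n i j : Nat) : Int :=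
  if i + 1 < n then
    (if pvCellA p i j = pvCellA p (i + 1) j ∧ pvCellA p i j = 1 then -1 else 1) else 0
def pvH (p : List (List Int)) (n i j : Nat) : Int :=
  if j + 1 < n then
    (if pvCellA p i j = pvCellA p i (j + 1) ∧ pvCellA p i j = 1 then -1 else 1) else 0

lemma sum2_diag (n a b : Nat) (ha : a < n) (hb : b < n) (v : Nat → Nat → Int) :
    (∑ i ∈ Finset.range n, ∑ j ∈ Finset.range n,
      (if a = i ∧ b = j then v i j else 0)) = v a b := by
  rw [Finset.sum_eq_single a]
  · rw [Finset.sum_eq_single b]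
    · simp
    · intro j _ hj; rw [if_neg (by rintro ⟨-, rfl⟩; exact hj rfl)]
    · intro hbn; exact absurd (Finset.mem_range.mpr hb) hbn
  · intro i _ hi
    apply Finset.sum_eq_zero; intro j _
    rw [if_neg (by rintro ⟨rfl, -⟩; exact hi rfl)]
  · intro han; exact absurd (Finset.mem_range.mpr ha) han

lemma sum2_shifti (n a b : Nat) (ha : a < n) (hb : b < n) (v : Nat → Nat → Int) :
    (∑ i ∈ Finset.range n, ∑ j ∈ Finset.range n,
      (if a = i + 1 ∧ b = j then v i j else 0)) = if 1 ≤ a then v (a - 1) b else 0 := by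
  rw [Finset.sum_eq_single (a - 1)]
  · rw [Finset.sum_eq_single b]
    · split_ifs <;> omega
    · intro j _ hj; rw [if_neg (by rintro ⟨-, rfl⟩; exact hj rfl)]
    · intro hbn; exact absurd (Finset.mem_range.mpr hb) hbn
  · intro i _ hi
    apply Finset.sum_eq_zero; intro j _
    rw [if_neg (by rintro ⟨h, -⟩; exact hi (by omega))]
  · intro han; exact absurd (Finset.mem_range.mpr (by omega)) han

lemma sum2_shiftj (n a b : Nat) (ha : a < n) (hb : b < n) (v : Nat → Nat → Int) :
    (∑ i ∈ Finset.range n, ∑ j ∈ Finset.range n,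
      (if a = i ∧ b = j + 1 then v i j else 0)) = if 1 ≤ b then v a (b - 1) else 0 := by
  rw [Finset.sum_eq_single a]
  · rw [Finset.sum_eq_single (b - 1)]
    · split_ifs <;> omega
    · intro j _ hj; rw [if_neg (by rintro ⟨-, h⟩; exact hj (by omega))]
    · intro hbn; exact absurd (Finset.mem_range.mpr (by omega)) hbn
  · intro i _ hi
    apply Finset.sum_eq_zero; intro j _
    rw [if_neg (by rintro ⟨rfl, -⟩; exact hi rfl)]
  · intro han; exact absurd (Finset.mem_range.mpr ha) han

lemma if_add (c : Prop) [Decidable c] (s e : Int) :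
    (if c then s + e else s) = s + (if c then e else 0) := by split_ifs <;> simp

lemma cellB_cast (p : List (List Int)) (i j : Nat) :
    pvCellB p (i : Int) (j : Int) = pvCellA p i j := by
  simp [pvCellB, pvCellA]

lemma cellB_subi (p : List (List Int)) (i j : Nat) :
    pvCellB p ((i : Int) - 1) (j : Int) = pvCellA p (i - 1) j := by
  have h : ((i : Int) - 1).toNat = i - 1 := by omega
  simp [pvCellB, pvCellA, h]

lemma cellB_addi (p : List (List Int)) (i j : Nat) :
    pvCellB p ((i : Int) + 1) (j : Int) = pvCellA p (i + 1) j := by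
  have h : ((i : Int) + 1).toNat = i + 1 := by omega
  simp [pvCellB, pvCellA, h]

lemma cellB_subj (p : List (List Int)) (i j : Nat) :
    pvCellB p (i : Int) ((j : Int) - 1) = pvCellA p i (j - 1) := by
  have h : ((j : Int) - 1).toNat = j - 1 := by omega
  simp [pvCellB, pvCellA, h]

lemma cellB_addj (p : List (List Int)) (i j : Nat) :
    pvCellB p (i : Int) ((j : Int) + 1) = pvCellA p i (j + 1) := by
  have h : ((j : Int) + 1).toNat = j + 1 := by omega
  simp [pvCellB, pvCellA, h]

lemma termUp (p : List (List Int)) (n a b : Nat) (ha : a < n) (hb : b < n) :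
    (if (0 : Int) ≤ (a : Int) - 1 ∧ (a : Int) - 1 < (n : Int) ∧ 0 ≤ (b : Int) ∧ (b : Int) < (n : Int) then
       if pvCellB p (a : Int) (b : Int) = pvCellB p ((a : Int) - 1) (b : Int) ∧
           pvCellB p (a : Int) (b : Int) = 1 then (-1 : Int) else 1
     else 0) = (if 1 ≤ a then pvV p n (a - 1) b else 0) := by
  by_cases hA : 1 ≤ a
  · rw [if_pos (by omega), if_pos hA]
    unfold pvV
    rw [if_pos (by omega : a - 1 + 1 < n), cellB_cast, cellB_subi,
      Nat.sub_add_cancel hA]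
    exact if_congr (by constructor <;> rintro ⟨h1, h2⟩ <;> exact ⟨h1.symm, h1 ▸ h2⟩) rfl rfl
  · rw [if_neg (by omega), if_neg hA]

lemma termDown (p : List (List Int)) (n a b : Nat) (ha : a < n) (hb : b < n) :
    (if (0 : Int) ≤ (a : Int) + 1 ∧ (a : Int) + 1 < (n : Int) ∧ 0 ≤ (b : Int) ∧ (b : Int) < (n : Int) then
       if pvCellB p (a : Int) (b : Int) = pvCellB p ((a : Int) + 1) (b : Int) ∧
           pvCellB p (a : Int) (b : Int) = 1 then (-1 : Int) else 1
     else 0) = pvV p n a b := by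
  unfold pvV
  by_cases hA : a + 1 < n
  · rw [if_pos (by omega), if_pos hA, cellB_cast, cellB_addi]
  · rw [if_neg (by omega), if_neg hA]

lemma termLeft (p : List (List Int)) (n a b : Nat) (ha : a < n) (hb : b < n) :
    (if (0 : Int) ≤ (a : Int) ∧ (a : Int) < (n : Int) ∧ 0 ≤ (b : Int) - 1 ∧ (b : Int) - 1 < (n : Int) then
       if pvCellB p (a : Int) (b : Int) = pvCellB p (a : Int) ((b : Int) - 1) ∧
           pvCellB p (a : Int) (b : Int) = 1 then (-1 : Int) else 1
     else 0) = (if 1 ≤ b then pvH p n a (b - 1) else 0) := by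
  by_cases hB : 1 ≤ b
  · rw [if_pos (by omega), if_pos hB]
    unfold pvH
    rw [if_pos (by omega : b - 1 + 1 < n), cellB_cast, cellB_subj,
      Nat.sub_add_cancel hB]
    exact if_congr (by constructor <;> rintro ⟨h1, h2⟩ <;> exact ⟨h1.symm, h1 ▸ h2⟩) rfl rfl
  · rw [if_neg (by omega), if_neg hB]

lemma termRight (p : List (List Int)) (n a b : Nat) (ha : a < n) (hb : b < n) :
    (if (0 : Int) ≤ (a : Int) ∧ (a : Int) < (n : Int) ∧ 0 ≤ (b : Int) + 1 ∧ (b : Int) + 1 < (n : Int) then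
       if pvCellB p (a : Int) (b : Int) = pvCellB p (a : Int) ((b : Int) + 1) ∧
           pvCellB p (a : Int) (b : Int) = 1 then (-1 : Int) else 1
     else 0) = pvH p n a b := by
  unfold pvH
  by_cases hB : b + 1 < n
  · rw [if_pos (by omega), if_pos hB, cellB_cast, cellB_addj]
  · rw [if_neg (by omega), if_neg hB]

lemma score_assembly (p : List (List Int)) (n a b : Nat) (ha : a < n) (hb : b < n) :
    pvV p n a b + (if 1 ≤ a then pvV p n (a - 1) b else 0)
      + (pvH p n a b + (if 1 ≤ b then pvH p n a (b - 1) else 0)) = pvScore p n a b := by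
  unfold pvScore
  simp only [List.foldl_cons, List.foldl_nil, if_add, zero_add]
  rw [termUp p n a b ha hb, termDown p n a b ha hb, termLeft p n a b ha hb,
    termRight p n a b ha hb]
  ring

lemma sum_delta (p : List (List Int)) (n : Nat) (a b : Nat) (ha : a < n) (hb : b < n) :
    (((List.range n).flatMap (fun i => (List.range n).map (fun j => (i, j)))).map
        (fun ij => pvDelta p n ij.1 ij.2 a b)).sum = pvScore p n a b := by
  classical
  rw [sum_map_flatMap, sum_map_range]
  have h1 : ∀ i, (((List.range n).map (fun j => (i, j))).map
      (fun ij => pvDelta p n ij.1 ij.2 a b)).sum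
      = ∑ j ∈ Finset.range n, pvDelta p n i j a b := by
    intro i; rw [List.map_map, sum_map_range]; rfl
  simp only [h1]
  have hsplit : ∀ i j, pvDelta p n i j a b =
      (if a = i ∧ b = j then pvV p n i j else 0)
      + (if a = i + 1 ∧ b = j then pvV p n i j else 0)
      + ((if a = i ∧ b = j then pvH p n i j else 0)
      + (if a = i ∧ b = j + 1 then pvH p n i j else 0)) := by
    intro i j
    unfold pvDelta pvV pvH
    split_ifs <;> omega
  simp only [hsplit]
  simp only [Finset.sum_add_distrib]
  rw [sum2_diag n a b ha hb, sum2_shifti n a b ha hb, sum2_diag n a b ha hb,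
    sum2_shiftj n a b ha hb]
  exact score_assembly p n a b ha hb

lemma zero_gridOf (n : Nat) :
    ((List.range n).foldl
      (fun acc _ => acc ++ [(List.range n).foldl (fun row _ => row ++ [(0 : Int)]) []]) [])
    = gridOf n (fun _ _ => (0 : Int)) := by
  have hrow : ∀ m : Nat, (List.range m).foldl (fun row _ => row ++ [(0 : Int)]) [] =
      List.replicate m (0 : Int) := by
    intro m
    induction m with
    | zero => simp
    | succ k ih => simp [List.range_succ, ih, List.replicate_succ']
  have houter : ∀ m : Nat, (List.range m).foldl
      (fun acc _ => acc ++ [(List.range n).foldl (fun row _ => row ++ [(0 : Int)]) []]) [] =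
      List.replicate m ((List.range n).foldl (fun row _ => row ++ [(0 : Int)]) []) := by
    intro m
    induction m with
    | zero => simp
    | succ k _ => simp [List.range_succ, List.replicate_succ']
  rw [houter, hrow]
  unfold gridOf
  simp [List.map_const']

-- ===== VERDICT (by name: the statement is the Claim_ definition above) =====
theorem count_neighbours_4_black_spec : Claim_equal_count_neighbours_4_black := by
  intro picture _ _
  unfold Spec_count_neighbours_4_black count_neighbours_4_black count_neighbours_4_black_alt
  simp only []
  rw [zero_gridOf, fold_gridOf]
  · apply gridOf_congr
    intro a ha b hb
    rw [sum_delta picture _ a b ha hb]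
    simp
  · intro ij hij
    simp only [List.mem_flatMap, List.mem_map, List.mem_range] at hij
    obtain ⟨i, hi, j, hj, rfl⟩ := hij
    exact ⟨hi, hj⟩
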